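-- pv_equiv track=rewrite | github.com/zhufu2012/Remnant-Afterglow-Project | 工具/基础配置工具2.0/DataHandle.py | GetExportLine
-- ===== SOURCE A (Python) =====
-- def check_value(value, key):
--     if value == key or value == (str(key) + ".0") or value == str(key):
--         return True
--     else:
--         return False
--
-- def GetExportLine(item_list):
--     export_list = []
--     line_dict = {}  ##横排要导出的位置{假行数，真行数}
--     line_add = 0
--     for index, item in enumerate(item_list[3:]):
--         value = item[1]
--         line = index + 3
--         if check_value(value, 0):
--             continue
--         elif check_value(value, 1):
--             line_dict[line_add] = line + 2
--             export_list.append(line)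
--             line_add += 1
--         elif check_value(value, 2):
--             line_dict[line_add] = line + 2
--             export_list.append(line)
--             line_add += 1
--             break
--         else:
--             continue
--
--     return export_list, line_dict
-- ===== SOURCE B (Python) =====
-- def GetExportLine(item_list):
--     # B: locate the break row first, truncate, then build both outputs declaratively.
--     tail = item_list[3:]
--     cut = next((i for i, it in enumerate(tail) if it[1] in ("2", "2.0")), None)
--     if cut is not None:
--         tail = tail[:cut + 1]
--     export_list = [i + 3 for i, it in enumerate(tail) if it[1] in ("1", "1.0", "2", "2.0")]
--     line_dict = {i: line + 2 for i, line in enumerate(export_list)}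
--     return export_list, line_dict
-- ===== Notes on version B (the rewrite author's own statement) =====
-- stated objective: alternative
-- what changed: B replaces A's single stateful loop (threaded line_add counter, interleaved dict writes, in-loop break) by staged passes: first locate the break row (first second-cell match of 2), truncate the tail there, then build export_list as a filter/map over the truncated list and derive line_dict by enumeration.
import Mathlib
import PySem

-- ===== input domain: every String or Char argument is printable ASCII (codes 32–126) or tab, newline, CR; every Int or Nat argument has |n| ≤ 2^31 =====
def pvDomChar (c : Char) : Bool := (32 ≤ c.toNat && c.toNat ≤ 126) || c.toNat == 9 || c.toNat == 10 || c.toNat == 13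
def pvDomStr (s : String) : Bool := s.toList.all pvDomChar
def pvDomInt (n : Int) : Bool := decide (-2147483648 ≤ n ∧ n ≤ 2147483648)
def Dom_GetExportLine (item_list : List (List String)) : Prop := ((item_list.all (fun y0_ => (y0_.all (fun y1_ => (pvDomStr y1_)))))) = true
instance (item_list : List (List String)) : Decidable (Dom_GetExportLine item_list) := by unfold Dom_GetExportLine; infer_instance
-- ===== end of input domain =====

-- B replaces A's single stateful loop (threaded line_add counter, interleaved dict
-- writes, in-loop break) by staged passes: locate the break row, truncate, then build
-- export_list by a filter/map and line_dict by enumeration (objective: alternative).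

-- ===== PORT A =====
-- 'value == key' compares a str with an int in Python and is always False; the two
-- remaining disjuncts are compared on List Char (kernel-transparent string equality).
def checkValue (value : String) (key : Int) : Bool :=
  value.toList == (PySem.Int.toChars key ++ ".0".toList) || value.toList == PySem.Int.toChars key

-- the loop of A, with the break as a non-recursive branch; item[1] on a short row is a
-- Python IndexError, excluded by Pre_GetExportLine (getD "" is never observed inside Pre_).
def goA : List (List String) → Int → List Int → PySem.Dict Int Int → Int →
    List Int × PySem.Dict Int Int
  | [], _, exp, d, _ => (exp, d)
  | item :: rest, index, exp, d, add =>
    let value := (PySem.List.pyGet? item 1).getD ""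
    let line := index + 3
    if checkValue value 0 then goA rest (index + 1) exp d add
    else if checkValue value 1 then
      goA rest (index + 1) (exp ++ [line]) (d.insert add (line + 2)) (add + 1)
    else if checkValue value 2 then (exp ++ [line], d.insert add (line + 2))
    else goA rest (index + 1) exp d add

def GetExportLine (item_list : List (List String)) : List Int × (List (Int × Int)) :=
  let r := goA (PySem.List.slice item_list (some 3) none) 0 [] PySem.Dict.empty 0
  (r.1, r.2.items)

-- ===== PORT B =====
-- it[1] in ("2", "2.0")
def isTwo (it : List String) : Bool :=
  let v := (PySem.List.pyGet? it 1).getD ""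
  v.toList == "2".toList || v.toList == "2.0".toList

-- it[1] in ("1", "1.0", "2", "2.0")
def isExport (it : List String) : Bool :=
  let v := (PySem.List.pyGet? it 1).getD ""
  v.toList == "1".toList || v.toList == "1.0".toList ||
  v.toList == "2".toList || v.toList == "2.0".toList

-- next((i for i, it in enumerate(tail) if it[1] in ("2","2.0")), None): lazy scan
def findCut : List (List String) → Int → Option Int
  | [], _ => none
  | it :: rest, i => if isTwo it then some i else findCut rest (i + 1)

-- 'if cut is not None: tail = tail[:cut + 1]'
def truncAtTwo (tail : List (List String)) : List (List String) :=
  match findCut tail 0 with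
  | some c => PySem.List.slice tail none (some (c + 1))
  | none => tail

def GetExportLine_alt (item_list : List (List String)) : List Int × (List (Int × Int)) :=
  let tail := PySem.List.slice item_list (some 3) none
  let exp := ((PySem.List.enumerate (truncAtTwo tail) 0).filter (fun p => isExport p.2)).map
    (fun p => p.1 + 3)
  (exp, (PySem.List.enumerate exp 0).map (fun p => (p.1, p.2 + 2)))

-- ===== PRECONDITION & SPEC =====
def pvIsTwoRow (row : List String) : Bool :=
  match PySem.List.pyGet? row 1 with
  | some v => decide (v = "2" ∨ v = "2.0")
  | none => false

-- Pre_ excludes exactly the inputs where Python A raises IndexError on item[1]: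
-- a row of item_list[3:] with fewer than 2 cells that is reached before (or at) the
-- first row whose second cell matches 2 (the break).
def Pre_GetExportLine (item_list : List (List String)) : Prop :=
  ∀ i < (item_list.drop 3).length,
    ((item_list.drop 3).getD i []).length < 2 →
      ∃ j < i, pvIsTwoRow ((item_list.drop 3).getD j []) = true
instance (item_list : List (List String)) : Decidable (Pre_GetExportLine item_list) := by
  unfold Pre_GetExportLine; infer_instance

def pvWitness_GetExportLine : List (List String) :=
  [["a", "0"], ["b", "1"], [], ["c", "1"], ["d", "2"]]

def Spec_GetExportLine (item_list : List (List String)) (out : List Int × (List (Int × Int))) : Prop := out = GetExportLine_alt item_list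
instance (item_list : List (List String)) (out : List Int × (List (Int × Int))) : Decidable (Spec_GetExportLine item_list out) := by unfold Spec_GetExportLine; infer_instance

-- ===== CLAIM (what is proved, stated in full; the proofs are below) =====
def Claim_equal_GetExportLine : Prop := ∀ (item_list : List (List String)), Dom_GetExportLine item_list → Pre_GetExportLine item_list → Spec_GetExportLine item_list (GetExportLine item_list)

-- ===== LEMMAS AND PROOFS =====

-- proof-side intermediate: the export lines as one structural recursion
def collectLines : List (List String) → Int → List Int
  | [], _ => []
  | item :: rest, index =>
    let v := (PySem.List.pyGet? item 1).getD ""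
    if v.toList == "1".toList || v.toList == "1.0".toList then
      (index + 3) :: collectLines rest (index + 1)
    else if v.toList == "2".toList || v.toList == "2.0".toList then [index + 3]
    else collectLines rest (index + 1)

lemma checkValue_one (v : String) :
    checkValue v 1 = (v.toList == "1".toList || v.toList == "1.0".toList) := by
  have h : PySem.Int.toChars 1 ++ ".0".toList = "1.0".toList := by decide
  have h1 : PySem.Int.toChars 1 = "1".toList := by decide
  rw [checkValue, h, h1, Bool.or_comm]

lemma checkValue_two (v : String) :
    checkValue v 2 = (v.toList == "2".toList || v.toList == "2.0".toList) := by
  have h : PySem.Int.toChars 2 ++ ".0".toList = "2.0".toList := by decide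
  have h2 : PySem.Int.toChars 2 = "2".toList := by decide
  rw [checkValue, h, h2, Bool.or_comm]

lemma checkValue_zero_skip (v : String) (h : checkValue v 0 = true) :
    (v.toList == "1".toList || v.toList == "1.0".toList) = false ∧
    (v.toList == "2".toList || v.toList == "2.0".toList) = false := by
  have h00 : PySem.Int.toChars 0 ++ ".0".toList = "0.0".toList := by decide
  have h0 : PySem.Int.toChars 0 = "0".toList := by decide
  rw [checkValue, h00, h0] at h
  rcases Bool.or_eq_true_iff.mp h with h' | h' <;>
    · have hv := eq_of_beq h'
      constructor <;> simp [hv]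

lemma two_not_one (v : String)
    (h : (v.toList == "2".toList || v.toList == "2.0".toList) = true) :
    (v.toList == "1".toList || v.toList == "1.0".toList) = false := by
  rcases Bool.or_eq_true_iff.mp h with h' | h' <;>
    · have hv := eq_of_beq h'
      simp [hv]

lemma goA_eq (l : List (List String)) : ∀ (index : Int) (exp : List Int)
    (d : PySem.Dict Int Int) (add : Int),
    (∀ k, add ≤ k → d.contains k = false) →
    (goA l index exp d add).1 = exp ++ collectLines l index ∧
    (goA l index exp d add).2.items =
      d.items ++ (PySem.List.enumerate (collectLines l index) add).map
        (fun p => (p.1, p.2 + 2)) := by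
  induction l with
  | nil =>
    intro index exp d add hd
    simp [goA, collectLines, PySem.List.enumerate_nil]
  | cons item rest ih =>
    intro index exp d add hd
    set v := (PySem.List.pyGet? item 1).getD "" with hv
    by_cases h0 : checkValue v 0 = true
    · obtain ⟨hn1, hn2⟩ := checkValue_zero_skip v h0
      have hc : collectLines (item :: rest) index = collectLines rest (index + 1) := by
        rw [collectLines]; rw [← hv, hn1, hn2]; simp
      rw [hc]
      have := ih (index + 1) exp d add hd
      simpa [goA, ← hv, h0] using this
    · by_cases h1 : checkValue v 1 = true
      · have hb1 : (v.toList == "1".toList || v.toList == "1.0".toList) = true := by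
          rw [← checkValue_one]; exact h1
        have hc : collectLines (item :: rest) index =
            (index + 3) :: collectLines rest (index + 1) := by
          rw [collectLines]; rw [← hv, hb1]; simp
        have hdc : d.contains add = false := hd add le_rfl
        have hd' : ∀ k, add + 1 ≤ k → (d.insert add (index + 3 + 2)).contains k = false := by
          intro k hk
          rw [PySem.Dict.contains_insert]
          have hne : (k == add) = false := by simp; omega
          rw [hne, hd k (by omega)]; rfl
        have := ih (index + 1) (exp ++ [index + 3])
          (d.insert add (index + 3 + 2)) (add + 1) hd'
        rw [hc]
        constructor
        · rw [show (goA (item :: rest) index exp d add).1 =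
              (goA rest (index + 1) (exp ++ [index + 3])
                (d.insert add (index + 3 + 2)) (add + 1)).1 by
            simp [goA, ← hv, h0, h1]]
          rw [this.1]; simp
        · rw [show (goA (item :: rest) index exp d add).2 =
              (goA rest (index + 1) (exp ++ [index + 3])
                (d.insert add (index + 3 + 2)) (add + 1)).2 by
            simp [goA, ← hv, h0, h1]]
          rw [this.2, PySem.Dict.items_insert_of_not_contains _ _ hdc]
          simp [PySem.List.enumerate_cons]
      · by_cases h2 : checkValue v 2 = true
        · have hb1 : (v.toList == "1".toList || v.toList == "1.0".toList) = false := by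
            rw [← checkValue_one]; exact Bool.eq_false_iff.mpr h1
          have hb2 : (v.toList == "2".toList || v.toList == "2.0".toList) = true := by
            rw [← checkValue_two]; exact h2
          have hc : collectLines (item :: rest) index = [index + 3] := by
            rw [collectLines]; rw [← hv, hb1, hb2]; simp
          have hdc : d.contains add = false := hd add le_rfl
          rw [hc]
          constructor
          · simp [goA, ← hv, h0, h1, h2]
          · rw [show (goA (item :: rest) index exp d add).2 =
                d.insert add (index + 3 + 2) by simp [goA, ← hv, h0, h1, h2]]
            rw [PySem.Dict.items_insert_of_not_contains _ _ hdc]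
            simp [PySem.List.enumerate_cons, PySem.List.enumerate_nil]
        · have hb1 : (v.toList == "1".toList || v.toList == "1.0".toList) = false := by
            rw [← checkValue_one]; exact Bool.eq_false_iff.mpr h1
          have hb2 : (v.toList == "2".toList || v.toList == "2.0".toList) = false := by
            rw [← checkValue_two]; exact Bool.eq_false_iff.mpr h2
          have hc : collectLines (item :: rest) index = collectLines rest (index + 1) := by
            rw [collectLines]; rw [← hv, hb1, hb2]; simp
          rw [hc]
          have := ih (index + 1) exp d add hd
          simpa [goA, ← hv, h0, h1, h2] using this

lemma findCut_shift (l : List (List String)) : ∀ i : Int,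
    findCut l i = (findCut l 0).map (· + i) := by
  induction l with
  | nil => intro i; simp [findCut]
  | cons it rest ih =>
    intro i
    by_cases h : isTwo it = true
    · simp [findCut, h]
    · rw [findCut, findCut]
      simp only [h, if_false, Bool.false_eq_true]
      rw [ih (i + 1), ih (0 + 1)]
      cases findCut rest 0 <;> simp <;> try ring

lemma findCut_nonneg (l : List (List String)) (c : Int)
    (h : findCut l 0 = some c) : 0 ≤ c := by
  induction l generalizing c with
  | nil => simp [findCut] at h
  | cons it rest ih =>
    rw [findCut] at h
    by_cases h2 : isTwo it = true
    · simp [h2] at h; omega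
    · simp only [h2, if_false, Bool.false_eq_true, zero_add] at h
      rw [findCut_shift rest 1] at h
      cases hc : findCut rest 0 with
      | none => rw [hc] at h; simp at h
      | some c' => rw [hc] at h; simp at h; have := ih c' hc; omega

lemma truncAtTwo_cons_two (it : List String) (rest : List (List String))
    (h : isTwo it = true) : truncAtTwo (it :: rest) = [it] := by
  rw [truncAtTwo]
  simp only [findCut, h, if_true]
  rw [PySem.List.slice_to _ (by omega : (0:Int) ≤ 0 + 1)]
  simp

lemma truncAtTwo_cons (it : List String) (rest : List (List String))
    (h : isTwo it = false) : truncAtTwo (it :: rest) = it :: truncAtTwo rest := by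
  rw [truncAtTwo, truncAtTwo]
  simp only [findCut, h, if_false, Bool.false_eq_true, zero_add]
  rw [findCut_shift rest 1]
  cases hc : findCut rest 0 with
  | none => simp
  | some c =>
    have hcn : 0 ≤ c := findCut_nonneg rest c hc
    simp only [Option.map_some]
    rw [PySem.List.slice_to _ (by omega : (0:Int) ≤ c + 1 + 1),
        PySem.List.slice_to _ (by omega : (0:Int) ≤ c + 1)]
    have : (c + 1 + 1).toNat = (c + 1).toNat + 1 := by omega
    rw [this, List.take_succ_cons]

lemma staged_eq (l : List (List String)) : ∀ s : Int,
    ((PySem.List.enumerate (truncAtTwo l) s).filter (fun p => isExport p.2)).map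
      (fun p => p.1 + 3) = collectLines l s := by
  induction l with
  | nil => intro s; simp [truncAtTwo, findCut, collectLines, PySem.List.enumerate_nil]
  | cons it rest ih =>
    intro s
    set v := (PySem.List.pyGet? it 1).getD "" with hv
    by_cases h2 : isTwo it = true
    · have hb2 : (v.toList == "2".toList || v.toList == "2.0".toList) = true := by
        rw [hv]; exact h2
      have hb1 := two_not_one v hb2
      have he : isExport it = true := by
        rw [isExport, ← hv]
        rcases Bool.or_eq_true_iff.mp hb2 with h' | h' <;> simp [eq_of_beq h']
      have hc : collectLines (it :: rest) s = [s + 3] := by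
        rw [collectLines]; rw [← hv, hb1, hb2]; simp
      rw [truncAtTwo_cons_two it rest h2, hc]
      simp [PySem.List.enumerate_cons, PySem.List.enumerate_nil, he]
    · have hb2 : (v.toList == "2".toList || v.toList == "2.0".toList) = false := by
        rw [hv]; exact Bool.eq_false_iff.mpr h2
      rw [truncAtTwo_cons it rest (Bool.eq_false_iff.mpr h2), PySem.List.enumerate_cons]
      by_cases h1 : (v.toList == "1".toList || v.toList == "1.0".toList) = true
      · have he : isExport it = true := by
          rw [isExport, ← hv]
          rcases Bool.or_eq_true_iff.mp h1 with h' | h' <;> simp [eq_of_beq h']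
        have hc : collectLines (it :: rest) s = (s + 3) :: collectLines rest (s + 1) := by
          rw [collectLines]; rw [← hv, h1]; simp
        rw [hc]
        simp only [List.filter_cons, he, if_true, List.map_cons]
        rw [ih (s + 1)]
      · have hb1 : (v.toList == "1".toList || v.toList == "1.0".toList) = false :=
          Bool.eq_false_iff.mpr h1
        have he : isExport it = false := by
          rw [isExport, ← hv]
          rcases Bool.or_eq_false_iff.mp hb1 with ⟨ha, hb⟩
          rcases Bool.or_eq_false_iff.mp hb2 with ⟨hc', hd'⟩
          simp only [ha, hb, hc', hd']
          rfl
        have hc : collectLines (it :: rest) s = collectLines rest (s + 1) := by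
          rw [collectLines]; rw [← hv, hb1, hb2]; simp
        rw [hc]
        simp only [List.filter_cons, he, Bool.false_eq_true, if_false]
        rw [ih (s + 1)]

-- ===== VERDICT (by name: the statement is the Claim_ definition above) =====
theorem GetExportLine_spec : Claim_equal_GetExportLine := by
  intro item_list _ _
  unfold Spec_GetExportLine GetExportLine GetExportLine_alt
  have hd : ∀ k : Int, (0 : Int) ≤ k → (PySem.Dict.empty : PySem.Dict Int Int).contains k = false := by
    intro k _; simp [pysem]
  obtain ⟨h1, h2⟩ := goA_eq (PySem.List.slice item_list (some 3) none) 0 [] PySem.Dict.empty 0 hd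
  have hb := staged_eq (PySem.List.slice item_list (some 3) none) 0
  simp only [h1, h2, hb]
  simp [PySem.Dict.empty]
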